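-- pv_equiv track=rewrite | github.com/rweather/litton-tools | tools/tape-to-punchable.py | to_odd_parity
-- ===== SOURCE A (Python) =====
-- def to_odd_parity(b):
--     count = 0
--     for bit in range(0, 8):
--         if (b & (1 << bit)) != 0:
--             count = count + 1
--     result = (b & 0x0F) | ((b & 0x70) << 1);
--     if (count & 1) == 0:
--         result = result | 0x10
--     return result
-- ===== SOURCE B (Python) =====
-- def to_odd_parity(b):
--     p = b
--     p ^= p >> 4
--     p ^= p >> 2
--     p ^= p >> 1
--     result = (b & 0x0F) | ((b & 0x70) << 1)
--     if (p & 1) == 0: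
--         result = result | 0x10
--     return result
-- ===== Notes on version B (the rewrite author's own statement) =====
-- stated objective: idiomatic
-- what changed: Replaces the per-bit counting loop over the low byte by a branch-free XOR-fold parity computation (successively folding the upper half of the bits into the lower half and testing the lowest bit), keeping the bit rearrangement unchanged.
import Mathlib
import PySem

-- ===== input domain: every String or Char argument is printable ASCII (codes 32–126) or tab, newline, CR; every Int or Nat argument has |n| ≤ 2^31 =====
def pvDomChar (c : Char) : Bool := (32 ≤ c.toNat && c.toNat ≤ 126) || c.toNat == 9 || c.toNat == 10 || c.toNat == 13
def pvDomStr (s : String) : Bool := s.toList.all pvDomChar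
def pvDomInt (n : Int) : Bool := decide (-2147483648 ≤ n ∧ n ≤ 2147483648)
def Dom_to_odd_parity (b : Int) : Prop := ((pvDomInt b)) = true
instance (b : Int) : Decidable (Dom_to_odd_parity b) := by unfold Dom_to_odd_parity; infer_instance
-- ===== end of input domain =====

-- B replaces A's per-bit counting loop by the branch-free XOR parity fold
-- (fold the upper half of the bits into the lower half, thrice; test the lowest bit);
-- the bit rearrangement is unchanged.

-- ===== PORT A =====
-- Python & | << >> ^ on int are Int.land / Int.lor / <<< / >>> / Int.xor (two's complement,
-- arithmetic shift), exact on all Int including negatives.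
def to_odd_parity (b : Int) : Int :=
  let count : Int := (List.range 8).foldl
    (fun (count : Int) (bit : Nat) =>
      if Int.land b ((1:Int) <<< bit) ≠ 0 then count + 1 else count) 0
  let result : Int := Int.lor (Int.land b 0x0F) ((Int.land b 0x70) <<< (1:Nat))
  if Int.land count 1 = 0 then Int.lor result 0x10 else result

-- ===== PORT B =====
def to_odd_parity_alt (b : Int) : Int :=
  let p : Int := b
  let p : Int := Int.xor p (p >>> (4:Nat))
  let p : Int := Int.xor p (p >>> (2:Nat))
  let p : Int := Int.xor p (p >>> (1:Nat))
  let result : Int := Int.lor (Int.land b 0x0F) ((Int.land b 0x70) <<< (1:Nat))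
  if Int.land p 1 = 0 then Int.lor result 0x10 else result

-- ===== PRECONDITION & SPEC =====
def Spec_to_odd_parity (b : Int) (out : Int) : Prop := out = to_odd_parity_alt b
instance (b : Int) (out : Int) : Decidable (Spec_to_odd_parity b out) := by unfold Spec_to_odd_parity; infer_instance

-- ===== CLAIM (what is proved, stated in full; the proofs are below) =====
def Claim_equal_to_odd_parity : Prop := ∀ (b : Int), Dom_to_odd_parity b → Spec_to_odd_parity b (to_odd_parity b)

-- ===== LEMMAS AND PROOFS =====

theorem ldiff_two_pow (i : Nat) (m : Nat) :
    Nat.ldiff (2^i) m = if m.testBit i then 0 else 2^i := by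
  split <;> rename_i h <;> apply Nat.eq_of_testBit_eq <;> intro k <;>
    simp [Nat.testBit_ldiff, Nat.testBit_two_pow] <;> intro hk <;> subst hk <;> simp [h]

theorem land_one_eq_zero (x : Int) : (Int.land x 1 = 0) ↔ x.testBit 0 = false := by
  cases x with
  | ofNat n =>
      show (Int.ofNat (n &&& 1) = 0) ↔ _
      simp [Int.testBit, Nat.and_one_is_mod, Nat.testBit_zero]
      omega
  | negSucc m =>
      show (Int.ofNat (Nat.ldiff 1 m) = 0) ↔ _
      have h := ldiff_two_pow 0 m
      norm_num at h
      rw [h]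
      simp [Int.testBit, Nat.testBit_zero]

theorem land_pow_eq_zero (b : Int) (k : Nat) :
    (Int.land b ((1:Int) <<< k) = 0) ↔ b.testBit k = false := by
  have h1 : ((1:Int) <<< k) = Int.ofNat (2^k) := by
    show Int.ofNat (1 <<< k) = _
    simp [Nat.one_shiftLeft]
  rw [h1]
  cases b with
  | ofNat n =>
      show (Int.ofNat (n &&& 2^k) = 0) ↔ _
      simp [Int.testBit, Nat.and_two_pow]
  | negSucc m =>
      show (Int.ofNat (Nat.ldiff (2^k) m) = 0) ↔ _
      rw [ldiff_two_pow]
      simp [Int.testBit]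

theorem testBit_shiftRight_int (x : Int) (k j : Nat) :
    (x >>> k).testBit j = x.testBit (k+j) := by
  cases x with
  | ofNat n =>
      show (Int.ofNat (n >>> k)).testBit j = _
      simp [Int.testBit, Nat.testBit_shiftRight]
  | negSucc n =>
      show (Int.negSucc (n >>> k)).testBit j = _
      simp [Int.testBit, Nat.testBit_shiftRight]

-- the bit-count parity test of A and the XOR-fold parity test of B agree on every Int
theorem cond_iff (b : Int) :
    (Int.land ((List.range 8).foldl
        (fun (count : Int) (bit : Nat) =>
          if Int.land b ((1:Int) <<< bit) ≠ 0 then count + 1 else count) 0) 1 = 0)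
    ↔ (Int.land (Int.xor (Int.xor (Int.xor b (b >>> (4:Nat)))
            ((Int.xor b (b >>> (4:Nat))) >>> (2:Nat)))
          ((Int.xor (Int.xor b (b >>> (4:Nat)))
            ((Int.xor b (b >>> (4:Nat))) >>> (2:Nat))) >>> (1:Nat))) 1 = 0) := by
  rw [show List.range 8 = [0,1,2,3,4,5,6,7] from rfl]
  rw [land_one_eq_zero, land_one_eq_zero]
  simp only [List.foldl_cons, List.foldl_nil, ne_eq, land_pow_eq_zero, Int.testBit_lxor,
    testBit_shiftRight_int]
  norm_num
  generalize b.testBit 0 = b0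
  generalize b.testBit 1 = b1
  generalize b.testBit 2 = b2
  generalize b.testBit 3 = b3
  generalize b.testBit 4 = b4
  generalize b.testBit 5 = b5
  generalize b.testBit 6 = b6
  generalize b.testBit 7 = b7
  revert b0 b1 b2 b3 b4 b5 b6 b7
  decide

-- ===== VERDICT (by name: the statement is the Claim_ definition above) =====
theorem to_odd_parity_spec : Claim_equal_to_odd_parity := by
  intro b _
  unfold Spec_to_odd_parity to_odd_parity to_odd_parity_alt
  dsimp only
  have h := cond_iff b
  split_ifs with h1 h2 h3
  · rfl
  · exact absurd (h.mp h1) h2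
  · exact absurd (h.mpr h3) h1
  · rfl
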